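-- pv_equiv track=rewrite | github.com/VaHiX/CodeForces | Python/ByTier/E/2135_E1_Beyond_the_Palindrome_Easy_Version.py | build_g
-- ===== SOURCE A (Python) =====
-- MOD = 998244353
--
-- def sigma_odd_upto(N):
--     # Computes sum of odd divisors for each number up to N
--     s = [0] * (N + 1)
--     for d in range(1, N + 1, 2):  # Only iterate over odd numbers
--         step = d << 1  # Equivalent to 2*d
--         for m in range(d, N + 1, step):
--             s[m] += d  # Add divisor d to all multiples of d
--     return s
--
-- def build_g(N_plus_1):
--     # Precompute g(m) values based on sigma_odd_upto and bit decomposition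
--     sig = sigma_odd_upto(N_plus_1)
--     g = [0] * (N_plus_1 + 1)
--     for m in range(1, N_plus_1 + 1):
--         p2 = m & -m  # Isolate the largest power of 2 dividing m
--         odd = m // p2  # Extract the odd part of m
--         g[m] = (p2 * sig[odd]) % MOD  # Use precomputed odd divisor sum
--     return g
-- ===== SOURCE B (Python) =====
-- MOD = 998244353
--
-- def build_g(N_plus_1):
--     # g[m] is the sum of the divisors t of m for which m//t is odd
--     # (those are exactly t = lowbit(m)*d over the odd divisors d of m's odd
--     # part), so a single sieve over the odd multiples of every t builds g
--     # directly — no sigma table, no bit tricks, no second combining pass.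
--     if N_plus_1 < 0:
--         return []
--     g = [0] * (N_plus_1 + 1)
--     for t in range(1, N_plus_1 + 1):
--         for m in range(t, N_plus_1 + 1, 2 * t):
--             g[m] += t
--     return [x % MOD for x in g]
-- ===== Notes on version B (the rewrite author's own statement) =====
-- stated objective: simpler
-- what changed: B replaces A's two-phase scheme (odd-divisor sieve into a sigma table, then a per-element combine g[m]=(m&-m)*sig[m//(m&-m)]%MOD using bit tricks) with a single direct sieve of g itself: g[m] is the sum of the divisors t of m whose cofactor m//t is odd, so one loop over all t adding t to its odd multiples builds g with no sigma table, no bit manipulation and no second combining pass.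
import Mathlib
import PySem

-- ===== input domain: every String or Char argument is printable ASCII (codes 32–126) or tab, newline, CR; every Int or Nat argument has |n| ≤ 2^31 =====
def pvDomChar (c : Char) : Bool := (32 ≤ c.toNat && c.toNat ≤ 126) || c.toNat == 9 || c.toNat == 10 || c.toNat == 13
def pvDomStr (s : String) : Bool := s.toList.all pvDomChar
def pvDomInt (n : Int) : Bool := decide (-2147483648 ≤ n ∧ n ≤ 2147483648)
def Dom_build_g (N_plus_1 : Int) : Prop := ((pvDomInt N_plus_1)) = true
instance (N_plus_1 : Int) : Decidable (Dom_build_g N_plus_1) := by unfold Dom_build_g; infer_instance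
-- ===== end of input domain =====

-- B builds g by one direct sieve (g[m] = sum of divisors t of m with m//t odd) instead of A's
-- odd-divisor sigma table plus bit-trick combining pass (objective: simpler; same asymptotic cost).

-- ===== PORT A =====
def MOD : Int := 998244353

-- s[m] += d: indices produced by the ranges are always within bounds, so the total
-- pyGetD/pySetD forms are exact here.
def sigma_odd_upto (N : Int) : List Int :=
  (PySem.List.pyRange 1 (N + 1) 2).foldl (fun (s : List Int) (d : Int) =>
      let step := d <<< (1 : Nat)
      (PySem.List.pyRange d (N + 1) step).foldl (fun s m =>
          PySem.List.pySetD s m (PySem.List.pyGetD s m 0 + d)) s)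
    (List.replicate (N + 1).toNat 0)

def build_g (N_plus_1 : Int) : List Int :=
  let sig := sigma_odd_upto N_plus_1
  (PySem.List.pyRange 1 (N_plus_1 + 1) 1).foldl (fun g m =>
      let p2 := PySem.Int.band m (-m)
      let odd := PySem.Int.floordiv m p2
      PySem.List.pySetD g m (PySem.Int.mod (p2 * PySem.List.pyGetD sig odd 0) MOD))
    (List.replicate (N_plus_1 + 1).toNat 0)

-- ===== PORT B =====
-- transliteration of Source B (g[m] += t is in range because the sieved indices lie in [t, N])
def build_g_alt (N_plus_1 : Int) : List Int :=
  if N_plus_1 < 0 then []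
  else
    let g := (PySem.List.pyRange 1 (N_plus_1 + 1) 1).foldl (fun g t =>
        (PySem.List.pyRange t (N_plus_1 + 1) (2 * t)).foldl (fun g m =>
            PySem.List.pySetD g m (PySem.List.pyGetD g m 0 + t)) g)
      (List.replicate (N_plus_1 + 1).toNat 0)
    g.map (fun x => PySem.Int.mod x MOD)

-- ===== PRECONDITION & SPEC =====
def Spec_build_g (N_plus_1 : Int) (out : List Int) : Prop := out = build_g_alt N_plus_1
instance (N_plus_1 : Int) (out : List Int) : Decidable (Spec_build_g N_plus_1 out) := by unfold Spec_build_g; infer_instance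

-- ===== CLAIM (what is proved, stated in full; the proofs are below) =====
def Claim_equal_build_g : Prop := ∀ (N_plus_1 : Int), Dom_build_g N_plus_1 → Spec_build_g N_plus_1 (build_g N_plus_1)

-- ===== LEMMAS AND PROOFS =====

-- sum of the divisors of o (both sieves are reduced to this quantity)
def sigNat (o : Nat) : Nat := ∑ t ∈ o.divisors, t

-- ---- bit arithmetic: m & -m isolates the lowest set bit ----

-- for odd o, o and o-1 agree on all bits above bit 0
theorem pv_testBit_odd_sub_one (o : Nat) (ho : o % 2 = 1) (i : Nat) :
    o.testBit (i + 1) = (o - 1).testBit (i + 1) := by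
  rw [Nat.testBit_add_one, Nat.testBit_add_one]
  have : o / 2 = (o - 1) / 2 := by omega
  rw [this]

theorem pv_clear_low_bit (e o : Nat) (ho : o % 2 = 1) :
    (2 ^ e * o) &&& (2 ^ e * o - 1) = 2 ^ e * (o - 1) := by
  induction e with
  | zero =>
    simp only [pow_zero, one_mul]
    apply Nat.eq_of_testBit_eq
    intro i
    rw [Nat.testBit_and]
    cases i with
    | zero =>
      have h1 : o % 2 = 1 := ho
      have h2 : (o - 1) % 2 = 0 := by omega
      simp [h1, h2]
    | succ i =>
      rw [pv_testBit_odd_sub_one o ho i, Bool.and_self]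
  | succ e ih =>
    have hm : 1 ≤ 2 ^ e * o := by
      have : 1 ≤ o := by omega
      have := Nat.one_le_two_pow (n := e)
      nlinarith
    apply Nat.eq_of_testBit_eq
    intro i
    rw [Nat.testBit_and]
    cases i with
    | zero =>
      have h1 : (2 ^ (e + 1) * o) % 2 = 0 := by
        have : 2 ^ (e + 1) * o = 2 * (2 ^ e * o) := by ring
        omega
      simp only [Nat.testBit_zero]
      have h2 : (2 ^ (e + 1) * (o - 1)) % 2 = 0 := by
        have : 2 ^ (e + 1) * (o - 1) = 2 * (2 ^ e * (o - 1)) := by ring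
        omega
      simp [h1, h2]
    | succ i =>
      have e1 : 2 ^ (e + 1) * o = 2 * (2 ^ e * o) := by ring
      have e2 : 2 ^ (e + 1) * (o - 1) = 2 * (2 ^ e * (o - 1)) := by ring
      rw [Nat.testBit_add_one, Nat.testBit_add_one, Nat.testBit_add_one]
      have d1 : 2 ^ (e + 1) * o / 2 = 2 ^ e * o := by omega
      have d2 : (2 ^ (e + 1) * o - 1) / 2 = 2 ^ e * o - 1 := by omega
      have d3 : 2 ^ (e + 1) * (o - 1) / 2 = 2 ^ e * (o - 1) := by omega
      rw [d1, d2, d3, ← Nat.testBit_and, ih]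

-- Python's m & -m on a positive m
theorem pv_band_neg_self (M e o : Nat) (hM : M = 2 ^ e * o) (ho : o % 2 = 1) :
    PySem.Int.band (M : Int) (-(M : Int)) = ((2 ^ e : Nat) : Int) := by
  have hopos : 0 < o := by omega
  have hm : 0 < M := by rw [hM]; positivity
  have h0 : (0 : Int) ≤ (M : Int) := by omega
  have hneg : ¬ (0 : Int) ≤ -(M : Int) := by omega
  simp only [PySem.Int.band, if_pos h0, if_neg hneg]
  have ht : ((M : Int)).toNat = M := Int.toNat_natCast _
  have ht2 : (-(-(M : Int)) - 1).toNat = M - 1 := by omega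
  rw [ht, ht2]
  have hand : M &&& (M - 1) = 2 ^ e * (o - 1) := by rw [hM]; exact pv_clear_low_bit e o ho
  have hsub : 2 ^ e * (o - 1) = 2 ^ e * o - 2 ^ e := by rw [Nat.mul_sub]; ring_nf
  have hle : 2 ^ e ≤ 2 ^ e * o := Nat.le_mul_of_pos_right _ hopos
  have : M - (M &&& (M - 1)) = 2 ^ e := by
    rw [hand, hsub, hM]; exact Nat.sub_sub_self hle
  rw [this]

-- ---- list-update helpers ----

theorem pv_getD_set_self (l : List Int) (i : Nat) (v : Int) (h : i < l.length) :
    (l.set i v).getD i 0 = v := by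
  rw [List.getD_eq_getElem?_getD, List.getElem?_set_self h, Option.getD_some]

theorem pv_getD_set_ne (l : List Int) (i j : Nat) (v : Int) (h : i ≠ j) :
    (l.set i v).getD j 0 = l.getD j 0 := by
  rw [List.getD_eq_getElem?_getD, List.getElem?_set_ne h, ← List.getD_eq_getElem?_getD]

-- setting the cell just past a prefix
theorem pv_set_append (xs : List Int) (y v : Int) (ys : List Int) :
    (xs ++ y :: ys).set xs.length v = xs ++ v :: ys := by
  induction xs with
  | nil => rfl
  | cons a t ih => simp [ih]

-- writing f m at position m for m in range(1, b) into a zero array of size b.toNat + t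
theorem pv_fill_eq (f : Int → Int) (t : Nat) (b : Int) (hb : 1 ≤ b) :
    (PySem.List.pyRange 1 b 1).foldl (fun g m => PySem.List.pySetD g m (f m))
        (List.replicate (b.toNat + t) 0)
      = (0 :: (PySem.List.pyRange 1 b 1).map f) ++ List.replicate t (0 : Int) := by
  induction b, hb using Int.le_induction generalizing t with
  | base =>
    rw [PySem.List.pyRange_one_eq_nil (by norm_num)]
    rw [show (1:Int).toNat + t = t + 1 from by omega, List.replicate_succ]
    simp
  | succ b hb ih =>
    rw [PySem.List.pyRange_one_succ_right (by omega), List.foldl_append]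
    have hrep : ((b + 1).toNat + t) = (b.toNat + (t + 1)) := by omega
    rw [hrep, ih (t + 1)]
    simp only [List.foldl_cons, List.foldl_nil]
    rw [PySem.List.pySetD_of_nonneg _ _ (by omega : (0:Int) ≤ b), List.replicate_succ]
    have hlen : b.toNat = ((0 : Int) :: (PySem.List.pyRange 1 b 1).map f).length := by
      simp [PySem.List.length_pyRange_one]
      omega
    conv_lhs => rw [hlen]
    rw [pv_set_append, List.map_append]
    simp

-- ---- generic sieve characterisation ----

-- a pyRange with positive step has no repeated elements
theorem pv_nodup_pyRange_pos (a b s : Int) (hs : 0 < s) : (PySem.List.pyRange a b s).Nodup := by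
  rw [PySem.List.pyRange_of_pos a b hs]
  apply List.Nodup.map _ (List.nodup_range)
  intro x y h
  have : (x : Int) = (y : Int) := by
    have hsne : s ≠ 0 := by omega
    have := mul_left_cancel₀ hsne (by linarith [h] : s * (x:Int) = s * (y:Int))
    exact this
  exact_mod_cast this

-- the inner loop "for m in M: s[m] += t" adds t exactly at the members of M
theorem pv_inner_len (t : Int) (M : List Int) (s : List Int) :
    (M.foldl (fun s m => PySem.List.pySetD s m (PySem.List.pyGetD s m 0 + t)) s).length
      = s.length := by
  induction M generalizing s with
  | nil => rfl
  | cons m M ih => simp [ih, PySem.List.length_pySetD]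

theorem pv_inner_char (t : Int) (M : List Int) :
    ∀ (s : List Int), M.Nodup → (∀ x ∈ M, 0 ≤ x ∧ x < (s.length : Int)) → ∀ j : Nat,
      (M.foldl (fun s m => PySem.List.pySetD s m (PySem.List.pyGetD s m 0 + t)) s).getD j 0
        = s.getD j 0 + (if (j : Int) ∈ M then t else 0) := by
  induction M with
  | nil => intro s _ _ j; simp
  | cons m M ih =>
    intro s hnd hb j
    obtain ⟨hm0, hmlt⟩ := hb m (List.mem_cons_self)
    have hmt : m.toNat < s.length := by omega
    have hmc : m = ((m.toNat : Nat) : Int) := by omega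
    simp only [List.foldl_cons]
    rw [PySem.List.pySetD_of_nonneg _ _ hm0, PySem.List.pyGetD_of_nonneg _ _ hm0]
    rw [ih _ (List.nodup_cons.mp hnd).2
        (fun x hx => by simpa [List.length_set] using hb x (List.mem_cons_of_mem _ hx))]
    by_cases hj : j = m.toNat
    · have hjm : ((j : Nat) : Int) = m := by omega
      have hnotin : ((j : Nat) : Int) ∉ M := by rw [hjm]; exact (List.nodup_cons.mp hnd).1
      rw [hj, pv_getD_set_self _ _ _ hmt, ← hj]
      rw [if_neg hnotin, if_pos (by rw [hjm]; exact List.mem_cons_self)]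
      ring
    · have hjm : ((j : Nat) : Int) ≠ m := by omega
      rw [pv_getD_set_ne _ _ _ _ (fun h => hj h.symm)]
      have hmem : ((j : Nat) : Int) ∈ m :: M ↔ ((j : Nat) : Int) ∈ M := by
        rw [List.mem_cons]; exact or_iff_right hjm
      simp only [hmem]

theorem pv_sieve_len (N : Int) (R : List Int) (s : List Int) :
    (R.foldl (fun s d =>
        (PySem.List.pyRange d (N + 1) (2 * d)).foldl (fun s m =>
            PySem.List.pySetD s m (PySem.List.pyGetD s m 0 + d)) s) s).length
      = s.length := by
  induction R generalizing s with
  | nil => rfl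
  | cons d R ih => simp [ih, pv_inner_len]

theorem pv_sieve_char (N : Int) (hN : 0 ≤ N) (R : List Int) (hR : ∀ d ∈ R, 1 ≤ d) :
    ∀ (s : List Int), s.length = (N + 1).toNat → ∀ j : Nat,
      (R.foldl (fun s d =>
          (PySem.List.pyRange d (N + 1) (2 * d)).foldl (fun s m =>
              PySem.List.pySetD s m (PySem.List.pyGetD s m 0 + d)) s) s).getD j 0
        = s.getD j 0
          + (R.map (fun d => if (j : Int) ∈ PySem.List.pyRange d (N + 1) (2 * d) then d else 0)).sum := by
  induction R with
  | nil => intro s _ j; simp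
  | cons d R ih =>
    intro s hs j
    have hd1 : 1 ≤ d := hR d (List.mem_cons_self)
    have hstep : (0 : Int) < 2 * d := by omega
    simp only [List.foldl_cons]
    rw [ih (fun x hx => hR x (List.mem_cons_of_mem _ hx)) _ (by rw [pv_inner_len]; exact hs)]
    rw [pv_inner_char d _ s (pv_nodup_pyRange_pos _ _ _ hstep) ?bounds j]
    · simp only [List.map_cons, List.sum_cons]; ring
    case bounds =>
      intro x hx
      obtain ⟨h1, h2, _⟩ := (PySem.List.mem_pyRange_iff_of_pos hstep x).mp hx
      constructor
      · omega
      · rw [hs]; omega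

-- ---- membership in the odd-multiples range is a divisibility statement ----

theorem pv_mem_odd_mult (N : Int) (t m : Nat) (ht : 1 ≤ t) (h1 : 1 ≤ m) (hmN : (m : Int) ≤ N) :
    ((m : Int) ∈ PySem.List.pyRange (t : Int) (N + 1) (2 * (t : Int)))
      ↔ (t ∣ m ∧ (m / t) % 2 = 1) := by
  have hstep : (0 : Int) < 2 * (t : Int) := by
    have : (1 : Int) ≤ (t : Int) := by exact_mod_cast ht
    omega
  rw [PySem.List.mem_pyRange_iff_of_pos hstep]
  constructor
  · rintro ⟨hle, _, c, hc⟩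
    have ht' : (1 : Int) ≤ (t : Int) := by exact_mod_cast ht
    have hc0 : 0 ≤ c := by nlinarith
    have hm2 : (m : Int) = (t : Int) * (2 * c + 1) := by linear_combination hc
    rw [show c = ((c.toNat : Nat) : Int) from by omega] at hm2
    have hm3 : m = t * (2 * c.toNat + 1) := by exact_mod_cast hm2
    refine ⟨⟨2 * c.toNat + 1, hm3⟩, ?_⟩
    rw [hm3, Nat.mul_div_cancel_left _ (by omega)]
    omega
  · rintro ⟨⟨c, hc⟩, hq⟩
    rw [hc, Nat.mul_div_cancel_left _ (by omega)] at hq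
    have hc1 : 1 ≤ c := by
      by_contra h
      have : c = 0 := by omega
      rw [this, Nat.mul_zero] at hc
      omega
    have hc2 : c = 2 * ((c - 1) / 2) + 1 := by omega
    have hm3 : m = t * (2 * ((c - 1) / 2) + 1) := by
      rw [hc]; exact congrArg (fun x => t * x) (by omega)
    refine ⟨?_, by omega, ⟨(((c - 1) / 2 : Nat) : Int), by push_cast [hm3]; ring⟩⟩
    have : t ≤ m := by rw [hc]; exact Nat.le_mul_of_pos_right _ (by omega)
    exact_mod_cast this

-- a divisor of an odd number is odd
theorem pv_odd_dvd_odd (a b : Nat) (ha : a % 2 = 1) (h : b ∣ a) : b % 2 = 1 := by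
  rcases Nat.even_or_odd b with hb | hb
  · exfalso
    rcases hb with ⟨c, rfl⟩
    rcases h with ⟨d, hd⟩
    have : a = 2 * (c * d) := by rw [hd]; ring
    omega
  · exact Nat.odd_iff.mp hb

-- 2^e divides every divisor of 2^e*o whose cofactor is odd
theorem pv_pow2_dvd (e o t : Nat) (ht : t ∣ 2 ^ e * o) (hq : ((2 ^ e * o) / t) % 2 = 1) :
    2 ^ e ∣ t := by
  have hq' : t * ((2 ^ e * o) / t) = 2 ^ e * o := Nat.mul_div_cancel' ht
  have hcop : Nat.Coprime (2 ^ e) ((2 ^ e * o) / t) :=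
    Nat.Coprime.pow_left _ ((Nat.Prime.coprime_iff_not_dvd Nat.prime_two).mpr (by omega))
  exact hcop.dvd_of_dvd_mul_right (by rw [hq'] ; exact Dvd.intro o rfl)

-- ---- the two indicator sums both equal (a multiple of) the divisor sum of the odd part ----

theorem pv_sumA (K o : Nat) (ho : o % 2 = 1) (h1 : 1 ≤ o) (hoK : o ≤ 2 * K - 1) :
    (∑ k ∈ Finset.range K, if (2 * k + 1) ∣ o then 2 * k + 1 else 0) = sigNat o := by
  rw [← Finset.sum_filter]
  unfold sigNat
  apply Finset.sum_nbij' (i := fun k => 2 * k + 1) (j := fun t => t / 2)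
  · intro k hk
    simp only [Finset.mem_filter] at hk
    exact Nat.mem_divisors.mpr ⟨hk.2, by omega⟩
  · intro b hb
    obtain ⟨hdvd, _⟩ := Nat.mem_divisors.mp hb
    have hodd : b % 2 = 1 := pv_odd_dvd_odd o b ho hdvd
    have hble : b ≤ o := Nat.le_of_dvd (by omega) hdvd
    simp only [Finset.mem_filter, Finset.mem_range]
    refine ⟨by omega, by rw [show 2 * (b / 2) + 1 = b from by omega]; exact hdvd⟩
  · intro k _; omega
  · intro b hb
    obtain ⟨hdvd, _⟩ := Nat.mem_divisors.mp hb
    have hodd : b % 2 = 1 := pv_odd_dvd_odd o b ho hdvd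
    omega
  · intro k _; rfl

theorem pv_sumB (NN e o : Nat) (ho : o % 2 = 1) (h1 : 1 ≤ o) (hm : 2 ^ e * o ≤ NN) :
    (∑ k ∈ Finset.range NN,
        if ((k + 1) ∣ (2 ^ e * o) ∧ ((2 ^ e * o) / (k + 1)) % 2 = 1) then (k + 1 : Nat) else 0)
      = 2 ^ e * sigNat o := by
  have hp : 0 < 2 ^ e := Nat.two_pow_pos e
  rw [← Finset.sum_filter]
  unfold sigNat
  rw [Finset.mul_sum]
  apply Finset.sum_nbij' (i := fun k => (k + 1) / 2 ^ e) (j := fun d => 2 ^ e * d - 1)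
  · intro k hk
    simp only [Finset.mem_filter, Finset.mem_range] at hk
    obtain ⟨_, hdvd, hq⟩ := hk
    have h2e : 2 ^ e ∣ (k + 1) := pv_pow2_dvd e o (k + 1) hdvd hq
    have hco : 2 ^ e * ((k + 1) / 2 ^ e) = k + 1 := Nat.mul_div_cancel' h2e
    apply Nat.mem_divisors.mpr
    refine ⟨?_, by omega⟩
    have : 2 ^ e * ((k + 1) / 2 ^ e) ∣ 2 ^ e * o := by rw [hco]; exact hdvd
    exact (mul_dvd_mul_iff_left (by omega : (2:Nat) ^ e ≠ 0)).mp this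
  · intro d hd
    obtain ⟨hdvd, _⟩ := Nat.mem_divisors.mp hd
    have hd1 : 1 ≤ d := Nat.pos_of_dvd_of_pos hdvd (by omega)
    have hdle : d ≤ o := Nat.le_of_dvd (by omega) hdvd
    have h1e : 1 ≤ 2 ^ e * d := Nat.mul_pos (Nat.two_pow_pos e) (by omega)
    simp only [Finset.mem_filter, Finset.mem_range]
    have hsub : 2 ^ e * d - 1 + 1 = 2 ^ e * d := by omega
    refine ⟨?_, ?_, ?_⟩
    · have : 2 ^ e * d ≤ 2 ^ e * o := Nat.mul_le_mul_left _ hdle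
      omega
    · rw [hsub]; exact mul_dvd_mul_left _ hdvd
    · rw [hsub, Nat.mul_div_mul_left _ _ hp]
      exact pv_odd_dvd_odd o (o / d) ho (Nat.div_dvd_of_dvd hdvd)
  · intro k hk
    simp only [Finset.mem_filter, Finset.mem_range] at hk
    obtain ⟨_, hdvd, hq⟩ := hk
    have h2e : 2 ^ e ∣ (k + 1) := pv_pow2_dvd e o (k + 1) hdvd hq
    have hco : 2 ^ e * ((k + 1) / 2 ^ e) = k + 1 := Nat.mul_div_cancel' h2e
    omega
  · intro d hd
    obtain ⟨hdvd, _⟩ := Nat.mem_divisors.mp hd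
    have hd1 : 1 ≤ d := Nat.pos_of_dvd_of_pos hdvd (by omega)
    have h1e : 1 ≤ 2 ^ e * d := Nat.mul_pos (Nat.two_pow_pos e) (by omega)
    rw [show 2 ^ e * d - 1 + 1 = 2 ^ e * d from by omega, Nat.mul_div_cancel_left _ hp]
  · intro k hk
    simp only [Finset.mem_filter, Finset.mem_range] at hk
    obtain ⟨_, hdvd, hq⟩ := hk
    exact (Nat.mul_div_cancel' (pv_pow2_dvd e o (k + 1) hdvd hq)).symm

-- ---- bridging the Int list sums to the Nat Finset sums ----

theorem pv_range_sum (n : Nat) (g : Nat → Int) :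
    ((List.range n).map g).sum = ∑ k ∈ Finset.range n, g k := rfl

theorem pv_sumA_int (N : Int) (hN : 0 ≤ N) (o : Nat) (ho : o % 2 = 1) (h1 : 1 ≤ o)
    (hoN : (o : Int) ≤ N) :
    ((PySem.List.pyRange 1 (N + 1) 2).map
        (fun d => if ((o : Int) ∈ PySem.List.pyRange d (N + 1) (2 * d)) then d else 0)).sum
      = ((sigNat o : Nat) : Int) := by
  rw [PySem.List.pyRange_of_pos 1 (N + 1) (by norm_num)]
  have hK : (if (1 : Int) < N + 1 then ((N + 1 - 1 + 2 - 1) / 2).toNat else 0)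
      = ((N + 1) / 2).toNat := by split_ifs <;> omega
  rw [hK, List.map_map, pv_range_sum]
  set K : Nat := ((N + 1) / 2).toNat with hKdef
  have hstep : ∀ k ∈ Finset.range K,
      ((fun d => if ((o : Int) ∈ PySem.List.pyRange d (N + 1) (2 * d)) then d else 0) ∘
        (fun k : Nat => 1 + 2 * (k : Int))) k
      = ((((if (2 * k + 1) ∣ o then 2 * k + 1 else 0) : Nat)) : Int) := by
    intro k _
    simp only [Function.comp_apply]
    have hcast : (1 : Int) + 2 * (k : Int) = ((2 * k + 1 : Nat) : Int) := by push_cast; ring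
    rw [hcast]
    by_cases hd : (2 * k + 1) ∣ o
    · have hqodd : (o / (2 * k + 1)) % 2 = 1 :=
        pv_odd_dvd_odd o (o / (2 * k + 1)) ho (Nat.div_dvd_of_dvd hd)
      rw [if_pos ((pv_mem_odd_mult N (2 * k + 1) o (by omega) h1 hoN).mpr ⟨hd, hqodd⟩), if_pos hd]
    · rw [if_neg (fun h => hd ((pv_mem_odd_mult N (2 * k + 1) o (by omega) h1 hoN).mp h).1),
        if_neg hd]
      rfl
  rw [Finset.sum_congr rfl hstep, ← Nat.cast_sum]
  congr 1
  apply pv_sumA K o ho h1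
  omega

theorem pv_sumB_int (N : Int) (hN : 0 ≤ N) (e o : Nat) (ho : o % 2 = 1) (h1 : 1 ≤ o)
    (hmN : ((2 ^ e * o : Nat) : Int) ≤ N) :
    ((PySem.List.pyRange 1 (N + 1) 1).map
        (fun d => if (((2 ^ e * o : Nat) : Int) ∈ PySem.List.pyRange d (N + 1) (2 * d)) then d else 0)).sum
      = ((2 ^ e * sigNat o : Nat) : Int) := by
  have hm1 : 1 ≤ 2 ^ e * o := Nat.mul_pos (Nat.two_pow_pos e) (by omega)
  rw [PySem.List.pyRange_one 1 (N + 1), List.map_map]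
  have hcnt : (N + 1 - 1).toNat = N.toNat := by omega
  rw [hcnt, pv_range_sum]
  have hstep : ∀ k ∈ Finset.range N.toNat,
      ((fun d => if (((2 ^ e * o : Nat) : Int) ∈ PySem.List.pyRange d (N + 1) (2 * d)) then d else 0) ∘
        (fun k : Nat => (1 : Int) + (k : Int))) k
      = ((((if ((k + 1) ∣ (2 ^ e * o) ∧ ((2 ^ e * o) / (k + 1)) % 2 = 1) then k + 1 else 0) : Nat)) : Int) := by
    intro k _
    simp only [Function.comp_apply]
    have hcast : (1 : Int) + (k : Int) = ((k + 1 : Nat) : Int) := by push_cast; ring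
    rw [hcast]
    by_cases hd : (k + 1) ∣ (2 ^ e * o) ∧ ((2 ^ e * o) / (k + 1)) % 2 = 1
    · rw [if_pos ((pv_mem_odd_mult N (k + 1) (2 ^ e * o) (by omega) hm1 hmN).mpr hd), if_pos hd]
    · rw [if_neg (fun h => hd ((pv_mem_odd_mult N (k + 1) (2 ^ e * o) (by omega) hm1 hmN).mp h)),
        if_neg hd]
      rfl
  rw [Finset.sum_congr rfl hstep, ← Nat.cast_sum]
  congr 1
  apply pv_sumB N.toNat e o ho h1
  revert hmN
  generalize (2 : Nat) ^ e * o = Mn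
  intro h
  omega

-- nothing is ever added at index 0
theorem pv_sum_zero_index (N : Int) (R : List Int) (hR : ∀ d ∈ R, 1 ≤ d) :
    (R.map (fun d => if (0 : Int) ∈ PySem.List.pyRange d (N + 1) (2 * d) then d else 0)).sum = 0 := by
  apply List.sum_eq_zero
  intro x hx
  obtain ⟨d, hd, hdx⟩ := List.mem_map.mp hx
  have hd1 : 1 ≤ d := hR d hd
  rw [if_neg] at hdx
  · exact hdx.symm
  · intro hmem
    obtain ⟨h1, _, _⟩ := (PySem.List.mem_pyRange_iff_of_pos (by omega) 0).mp hmem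
    omega

-- ===== VERDICT (by name: the statement is the Claim_ definition above) =====
theorem build_g_spec : Claim_equal_build_g := by
  intro N _
  unfold Spec_build_g
  by_cases hneg : N < 0
  · simp only [build_g, build_g_alt, if_pos hneg]
    rw [PySem.List.pyRange_one_eq_nil (by omega)]
    simp only [List.foldl_nil]
    rw [show (N + 1).toNat = 0 from by omega, List.replicate_zero]
  · rw [not_lt] at hneg
    -- rewrite A's shifted step into 2*d so both sieves share one shape
    have hA : sigma_odd_upto N
        = (PySem.List.pyRange 1 (N + 1) 2).foldl (fun s d =>
            (PySem.List.pyRange d (N + 1) (2 * d)).foldl (fun s m =>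
                PySem.List.pySetD s m (PySem.List.pyGetD s m 0 + d)) s)
          (List.replicate (N + 1).toNat 0) := by
      unfold sigma_odd_upto
      congr 1
      funext s d
      rw [show d <<< (1 : Nat) = 2 * d from by rw [Int.shiftLeft_eq]; ring]
    have hRA : ∀ d ∈ PySem.List.pyRange 1 (N + 1) 2, 1 ≤ d := by
      intro d hd
      exact ((PySem.List.mem_pyRange_iff_of_pos (by norm_num) d).mp hd).1
    have hRB : ∀ d ∈ PySem.List.pyRange 1 (N + 1) 1, 1 ≤ d := by
      intro d hd
      exact ((PySem.List.mem_pyRange_one).mp hd).1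
    have hrep : (List.replicate (N + 1).toNat (0 : Int)).length = (N + 1).toNat := by simp
    -- characterisation of A's sigma table
    have hsig : ∀ j : Nat, j < (N + 1).toNat → (sigma_odd_upto N).getD j 0
        = ((PySem.List.pyRange 1 (N + 1) 2).map
            (fun d => if (j : Int) ∈ PySem.List.pyRange d (N + 1) (2 * d) then d else 0)).sum := by
      intro j hj
      rw [hA, pv_sieve_char N hneg _ hRA _ hrep j, List.getD_replicate _ hj, zero_add]
    -- B's sieve array
    set Barr : List Int := (PySem.List.pyRange 1 (N + 1) 1).foldl (fun g t =>
        (PySem.List.pyRange t (N + 1) (2 * t)).foldl (fun g m =>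
            PySem.List.pySetD g m (PySem.List.pyGetD g m 0 + t)) g)
      (List.replicate (N + 1).toNat 0) with hBarr
    have hBlen : Barr.length = (N + 1).toNat := by rw [hBarr, pv_sieve_len]; simp
    have hBchar : ∀ j : Nat, j < (N + 1).toNat → Barr.getD j 0
        = ((PySem.List.pyRange 1 (N + 1) 1).map
            (fun d => if (j : Int) ∈ PySem.List.pyRange d (N + 1) (2 * d) then d else 0)).sum := by
      intro j hj
      rw [hBarr, pv_sieve_char N hneg _ hRB _ hrep j, List.getD_replicate _ hj, zero_add]
    -- A's final list as a cons/map
    have hAfin : build_g N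
        = 0 :: (PySem.List.pyRange 1 (N + 1) 1).map (fun m =>
            PySem.Int.mod (PySem.Int.band m (-m)
              * PySem.List.pyGetD (sigma_odd_upto N) (PySem.Int.floordiv m (PySem.Int.band m (-m))) 0) MOD) := by
      show (PySem.List.pyRange 1 (N + 1) 1).foldl _ _ = _
      rw [show (N + 1).toNat = (N + 1).toNat + 0 from rfl,
          pv_fill_eq _ 0 (N + 1) (by omega), List.replicate_zero, List.append_nil]
    have hBfin : build_g_alt N = Barr.map (fun x => PySem.Int.mod x MOD) := by
      simp only [build_g_alt, if_neg (not_lt.mpr hneg), hBarr]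
    rw [hAfin, hBfin]
    apply List.ext_getElem
    · simp [hBlen, PySem.List.length_pyRange_one]
      omega
    · intro k hk1 hk2
      rw [List.getElem_map]
      have hklt : k < (N + 1).toNat := by
        rw [List.length_map, hBlen] at hk2; exact hk2
      have hBk : Barr[k] = Barr.getD k 0 := by
        rw [List.getD_eq_getElem?_getD, List.getElem?_eq_getElem (by omega), Option.getD_some]
      cases k with
      | zero =>
        rw [List.getElem_cons_zero, hBk, hBchar 0 hklt]
        simp only [Nat.cast_zero]
        rw [pv_sum_zero_index N _ hRB]
        decide
      | succ k =>
        rw [List.getElem_cons_succ, List.getElem_map, PySem.List.getElem_pyRange_one]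
        have hk3 : (1 : Int) + (k : Int) = (((k + 1 : Nat)) : Int) := by push_cast; ring
        rw [hk3]
        -- decompose k+1 = 2^e * o with o odd
        obtain ⟨e, o, hndvd, hmeq⟩ :=
          Nat.exists_eq_pow_mul_and_not_dvd (n := k + 1) (by omega) 2 (by norm_num)
        have ho : o % 2 = 1 := by omega
        have ho1 : 1 ≤ o := by omega
        have hole : o ≤ k + 1 := by
          rw [hmeq]; exact Nat.le_mul_of_pos_left o (Nat.two_pow_pos e)
        have hkN : ((k + 1 : Nat) : Int) ≤ N := by omega
        have hoN : ((o : Nat) : Int) ≤ N := by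
          have : ((o : Nat) : Int) ≤ ((k + 1 : Nat) : Int) := by exact_mod_cast hole
          omega
        -- A's value
        have hband := pv_band_neg_self (k + 1) e o hmeq ho
        have h2e : (0 : Int) < ((2 ^ e : Nat) : Int) := by positivity
        have hdiv : PySem.Int.floordiv (((k + 1 : Nat)) : Int) ((2 ^ e : Nat) : Int) = (o : Int) := by
          rw [PySem.Int.floordiv_eq_ediv_of_pos h2e, hmeq]
          push_cast
          rw [Int.mul_ediv_cancel_left _ (by positivity)]
        have hoidx : o < (N + 1).toNat := by omega
        rw [hband, hdiv, PySem.List.pyGetD_natCast, hsig o hoidx, pv_sumA_int N hneg o ho ho1 hoN]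
        -- B's value
        rw [hBk, hBchar (k + 1) hklt]
        have hmcast : (((k + 1 : Nat)) : Int) = ((2 ^ e * o : Nat) : Int) := by
          exact_mod_cast congrArg (Nat.cast : Nat → Int) hmeq
        rw [hmcast, pv_sumB_int N hneg e o ho ho1 (by rw [← hmcast]; omega)]
        have hfin : (((2 ^ e : Nat) : Nat) : Int) * ((sigNat o : Nat) : Int)
            = ((2 ^ e * sigNat o : Nat) : Int) := by push_cast; ring
        rw [hfin]
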